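-- pv_equiv track=rewrite | github.com/dzemchmielewski/homectrl | devel/pping.py | resolve_status
-- ===== SOURCE A (Python) =====
-- def resolve_status(values):
--     n = 0
--     last_error_type = 2
--     for v in reversed(values):
--         if v is None or v is False:
--             if last_error_type == 2:
--                 last_error_type = v
--                 n += 1
--             else:
--                 if v == last_error_type:
--                     n += 1
--                 else:
--                     break
--         else:
--             break
--
--     if not values:
--         return "unknown", "dim", n
--
--     last = values[-1]
--     if last is None:
--         return "timeout", "yellow", n
--     elif last is False:
--         return "error", "red", n
--     return "up", "green", n
-- ===== SOURCE B (Python) =====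
-- def resolve_status(values):
--     n = 0
--     prev = object()  # unique sentinel: never equal to None or False
--     for v in values:
--         if v is None or v is False:
--             n = n + 1 if v == prev else 1
--             prev = v
--         else:
--             n = 0
--             prev = object()
--
--     if not values:
--         return "unknown", "dim", n
--
--     last = values[-1]
--     if last is None:
--         return "timeout", "yellow", n
--     elif last is False:
--         return "error", "red", n
--     return "up", "green", n
-- ===== Notes on version B (the rewrite author's own statement) =====
-- stated objective: alternative
-- what changed: Replaces A's reversed-iteration loop with a sentinel state and an early break by a single forward fold maintaining a reset-on-change run counter over error values.
import Mathlib
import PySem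

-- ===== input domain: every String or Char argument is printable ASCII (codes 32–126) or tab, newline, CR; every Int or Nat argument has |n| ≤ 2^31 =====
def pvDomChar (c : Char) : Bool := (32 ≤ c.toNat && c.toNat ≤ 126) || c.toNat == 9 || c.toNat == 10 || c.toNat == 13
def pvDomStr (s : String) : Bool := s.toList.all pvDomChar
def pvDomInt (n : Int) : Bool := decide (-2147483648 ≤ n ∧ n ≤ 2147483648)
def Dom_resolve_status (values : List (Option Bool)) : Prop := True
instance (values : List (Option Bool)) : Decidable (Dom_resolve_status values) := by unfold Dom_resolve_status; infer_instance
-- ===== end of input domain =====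

-- B replaces A's reversed loop (sentinel state, early break) by one forward fold with a
-- reset-on-change run counter; objective: alternative (same cost, different decomposition).

-- ===== PORT A =====
-- A's for-loop over reversed(values) with `break`: structural recursion over values.reverse.
-- `last_error_type` starts at the sentinel 2 (here: none); an error value v is stored as some v.
def pvALoop : List (Option Bool) → Int → Option (Option Bool) → Int
  | [], n, _ => n
  | v :: rest, n, let_ =>
    if v = none ∨ v = some false then
      match let_ with
      | none => pvALoop rest (n + 1) (some v)
      | some l => if v = l then pvALoop rest (n + 1) (some l) else n
    else n

def resolve_status (values : List (Option Bool)) : String × String × Int :=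
  let n := pvALoop values.reverse 0 none
  if values = [] then ("unknown", "dim", n)
  else
    match values.getLast? with            -- values[-1]; values ≠ [] here
    | some none => ("timeout", "yellow", n)
    | some (some false) => ("error", "red", n)
    | _ => ("up", "green", n)

-- ===== PORT B =====
-- B's forward loop: state (n, prev); prev = none models the fresh unique sentinel object().
def pvBStep (s : Int × Option (Option Bool)) (v : Option Bool) : Int × Option (Option Bool) :=
  if v = none ∨ v = some false then
    (if some v = s.2 then s.1 + 1 else 1, some v)
  else (0, none)

def resolve_status_alt (values : List (Option Bool)) : String × String × Int :=
  let n := (values.foldl pvBStep (0, none)).1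
  if values = [] then ("unknown", "dim", n)
  else if values.getLast? = some none then ("timeout", "yellow", n)
  else if values.getLast? = some (some false) then ("error", "red", n)
  else ("up", "green", n)

-- ===== PRECONDITION & SPEC =====
def Spec_resolve_status (values : List (Option Bool)) (out : String × String × Int) : Prop := out = resolve_status_alt values
instance (values : List (Option Bool)) (out : String × String × Int) : Decidable (Spec_resolve_status values out) := by unfold Spec_resolve_status; infer_instance

-- ===== CLAIM (what is proved, stated in full; the proofs are below) =====
def Claim_equal_resolve_status : Prop := ∀ (values : List (Option Bool)), Dom_resolve_status values → Spec_resolve_status values (resolve_status values)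

-- ===== LEMMAS AND PROOFS =====

-- Invariant tying B's fold state on vs to A's loop on vs.reverse.
def pvInv (vs : List (Option Bool)) : Prop :=
  let s := vs.foldl pvBStep (0, none)
  (s.2 = none → s.1 = 0 ∧ ∀ k t, pvALoop vs.reverse k t = k) ∧
  (∀ v, s.2 = some v →
    (∀ k, pvALoop vs.reverse k none = k + s.1 ∧ pvALoop vs.reverse k (some v) = k + s.1) ∧
    (∀ w k, w ≠ v → pvALoop vs.reverse k (some w) = k))

theorem pvInv_holds (vs : List (Option Bool)) : pvInv vs := by
  induction vs using List.reverseRecOn with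
  | nil => simp [pvInv, pvALoop]
  | append_singleton xs u ih =>
    unfold pvInv at ih ⊢
    have hfold : (xs ++ [u]).foldl pvBStep (0, none) = pvBStep (xs.foldl pvBStep (0, none)) u := by
      simp
    have hrev : (xs ++ [u]).reverse = u :: xs.reverse := by simp
    rw [hfold, hrev]
    set s := xs.foldl pvBStep (0, none) with hs
    obtain ⟨h1, h2⟩ := ih
    by_cases herr : u = none ∨ u = some false
    · -- u is an error value
      have hsnd : (pvBStep s u).2 = some u := by simp [pvBStep, herr]
      refine ⟨fun hc => absurd (hsnd ▸ hc) (by simp), fun v hv => ?_⟩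
      have hvu : v = u := by rw [hsnd] at hv; exact (Option.some.injEq _ _).mp hv.symm
      subst hvu
      have hw2 : ∀ w k, w ≠ v → pvALoop (v :: xs.reverse) k (some w) = k := by
        intro w k hw
        simp [pvALoop, herr, Ne.symm hw]
      rcases hp : s.2 with _ | w
      · -- prev was the sentinel: counter becomes 1
        have hfst : (pvBStep s v).1 = 1 := by simp [pvBStep, herr, hp]
        obtain ⟨hz, hA⟩ := h1 hp
        refine ⟨fun k => ?_, hw2⟩
        rw [hfst]
        constructor <;> simp [pvALoop, herr, hA]
      · obtain ⟨hA, hB⟩ := h2 w hp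
        by_cases huw : v = w
        · subst huw
          have hfst : (pvBStep s v).1 = s.1 + 1 := by simp [pvBStep, herr, hp]
          refine ⟨fun k => ?_, hw2⟩
          rw [hfst]
          have h := (hA (k + 1)).2
          constructor <;> · simp [pvALoop, herr, h]; ring
        · have hfst : (pvBStep s v).1 = 1 := by simp [pvBStep, herr, hp, huw]
          refine ⟨fun k => ?_, hw2⟩
          rw [hfst]
          have h := hB v (k + 1) huw
          constructor <;> simp [pvALoop, herr, h]
    · -- u is not an error value: state resets
      refine ⟨fun _ => ⟨by simp [pvBStep, herr], fun k t => ?_⟩, fun v hv => ?_⟩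
      · cases t <;> simp [pvALoop, herr]
      · simp [pvBStep, herr] at hv

theorem pvLoop_eq (vs : List (Option Bool)) :
    pvALoop vs.reverse 0 none = (vs.foldl pvBStep (0, none)).1 := by
  have h := pvInv_holds vs
  unfold pvInv at h
  obtain ⟨h1, h2⟩ := h
  rcases hp : (vs.foldl pvBStep (0, none)).2 with _ | v
  · obtain ⟨hz, hA⟩ := h1 hp
    rw [hA 0 none, hz]
  · have := ((h2 v hp).1 0).1
    omega

-- ===== VERDICT (by name: the statement is the Claim_ definition above) =====
theorem resolve_status_spec : Claim_equal_resolve_status := by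
  intro values _
  unfold Spec_resolve_status resolve_status resolve_status_alt
  rw [pvLoop_eq]
  by_cases he : values = []
  · simp [he]
  · rcases h : values.getLast? with _ | (_ | b)
    · simp [he, h]
    · simp [he, h]
    · cases b <;> simp [he, h]
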